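-- pv_equiv track=rewrite | github.com/Relativity74205/adventofcode2020 | puzzle10b.py | process_sub_network
-- ===== SOURCE A (Python) =====
-- def process_sub_network(sub_net):
--     max_index = len(sub_net) - 1
--     to_visit = [0]
--     paths = 0
--
--     while len(to_visit) > 0:
--         current_index = to_visit.pop()
--         if current_index == max_index:
--             paths += 1
--             continue
--
--         for i in range(1, min(max_index - current_index, 3) + 1):
--             to_visit.append(current_index + i)
--
--     return paths
-- ===== SOURCE B (Python) =====
-- def process_sub_network(sub_net):
--     n = len(sub_net)
--     if n == 0:
--         return 0
--     a, b, c = 0, 0, 1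
--     for _ in range(n - 1):
--         a, b, c = b, c, a + b + c
--     return c
-- ===== Notes on version B (the rewrite author's own statement) =====
-- stated objective: faster
-- what changed: Replaced the exponential explicit-stack DFS enumeration of every 1/2/3-step path with a linear three-variable tribonacci DP over the length; intended as faster (asymptotic): measured 27x at n=16, and A did not finish at n=64 where B returned instantly.
import Mathlib
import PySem

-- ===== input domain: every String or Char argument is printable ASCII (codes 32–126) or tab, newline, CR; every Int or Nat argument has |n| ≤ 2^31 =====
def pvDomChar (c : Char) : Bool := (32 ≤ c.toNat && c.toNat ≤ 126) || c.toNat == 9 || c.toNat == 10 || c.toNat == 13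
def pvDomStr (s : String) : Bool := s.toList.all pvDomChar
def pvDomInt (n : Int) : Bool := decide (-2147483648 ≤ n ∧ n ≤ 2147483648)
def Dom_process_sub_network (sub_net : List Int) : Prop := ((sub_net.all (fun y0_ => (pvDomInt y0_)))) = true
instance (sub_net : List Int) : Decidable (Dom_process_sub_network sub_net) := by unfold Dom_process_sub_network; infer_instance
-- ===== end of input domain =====

-- B replaces A's explicit-stack DFS path enumeration with a three-variable tribonacci
-- DP over the length (objective: faster; intended as asymptotic speed-up — measured 27x
-- at n=16, and A did not finish at n=64 where B returned).

-- ===== PORT A =====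
-- Potential of a stack entry / of the whole stack, used only to justify termination
-- of A's while-loop (the loop itself is transliterated in pvLoopA).
def pvStackW (m : Int) : List Int → Nat
  | [] => 0
  | c :: rest => 4 ^ (m - c).toNat + pvStackW m rest

-- A's while-loop: to_visit is a stack (Python pops / appends at the END of the list);
-- here the TOP of the stack is the HEAD, so the for-loop's appends of current+1..current+k
-- become conses in the same order (foldl), which is the exact mirrored list.  The fuel
-- argument is only a totality guard: every iteration strictly decreases pvStackW (lemma
-- pvStackW_push_lt), so with fuel = pvStackW of the initial stack the 0-fuel branch is
-- never reached.
def pvLoopA (m : Int) : Nat → List Int → Int → Int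
  | _, [], paths => paths
  | 0, _ :: _, paths => paths
  | fuel + 1, c :: rest, paths =>
    if c = m then pvLoopA m fuel rest (paths + 1)
    else pvLoopA m fuel ((PySem.List.pyRange 1 (min (m - c) 3 + 1) 1).foldl
          (fun st i => (c + i) :: st) rest) paths

def process_sub_network (sub_net : List Int) : Int :=
  pvLoopA ((sub_net.length : Int) - 1) (pvStackW ((sub_net.length : Int) - 1) [0]) [0] 0

-- ===== PORT B =====
def process_sub_network_alt (sub_net : List Int) : Int :=
  let n : Int := (sub_net.length : Int)
  if n = 0 then 0
  else
    let t := (PySem.List.pyRange 0 (n - 1) 1).foldl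
      (fun (s : Int × Int × Int) _ => (s.2.1, s.2.2, s.1 + s.2.1 + s.2.2)) (0, 0, 1)
    t.2.2

-- ===== PRECONDITION & SPEC =====
def Spec_process_sub_network (sub_net : List Int) (out : Int) : Prop := out = process_sub_network_alt sub_net
instance (sub_net : List Int) (out : Int) : Decidable (Spec_process_sub_network sub_net out) := by unfold Spec_process_sub_network; infer_instance

-- ===== CLAIM (what is proved, stated in full; the proofs are below) =====
def Claim_equal_process_sub_network : Prop := ∀ (sub_net : List Int), Dom_process_sub_network sub_net → Spec_process_sub_network sub_net (process_sub_network sub_net)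

-- ===== LEMMAS AND PROOFS =====

theorem pvStackW_push_lt (m c : Int) (rest : List Int) :
    pvStackW m ((PySem.List.pyRange 1 (min (m - c) 3 + 1) 1).foldl
      (fun st i => (c + i) :: st) rest) < pvStackW m (c :: rest) := by
  have hpos : 0 < 4 ^ (m - c).toNat := pow_pos (by norm_num) _
  rcases lt_trichotomy (m - c) 1 with hd | hd | hd
  · -- d ≤ 0 : nothing is pushed
    have h1 : min (m - c) 3 + 1 ≤ 1 := by omega
    rw [PySem.List.pyRange_one_eq_nil h1]
    simp only [List.foldl_nil, pvStackW]; omega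
  · -- d = 1
    have h1 : min (m - c) 3 + 1 = 2 := by omega
    rw [h1, show PySem.List.pyRange 1 2 1 = [1] from by decide]
    simp only [List.foldl_cons, List.foldl_nil, pvStackW]
    have e1 : (m - (c + 1)).toNat = 0 := by omega
    have e0 : (m - c).toNat = 1 := by omega
    rw [e1, e0]; omega
  · rcases lt_trichotomy (m - c) 3 with hd3 | hd3 | hd3
    · -- d = 2
      have h1 : min (m - c) 3 + 1 = 3 := by omega
      rw [h1, show PySem.List.pyRange 1 3 1 = [1, 2] from by decide]
      simp only [List.foldl_cons, List.foldl_nil, pvStackW]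
      have e1 : (m - (c + 1)).toNat = 1 := by omega
      have e2 : (m - (c + 2)).toNat = 0 := by omega
      have e0 : (m - c).toNat = 2 := by omega
      rw [e1, e2, e0]
      have : pvStackW m rest = pvStackW m rest := rfl
      omega
    all_goals
    · -- d ≥ 3
      have h1 : min (m - c) 3 + 1 = 4 := by omega
      rw [h1, show PySem.List.pyRange 1 4 1 = [1, 2, 3] from by decide]
      simp only [List.foldl_cons, List.foldl_nil, pvStackW]
      obtain ⟨j, hj⟩ : ∃ j : Nat, (m - c).toNat = 3 + j := ⟨(m - c).toNat - 3, by omega⟩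
      have e1 : (m - (c + 1)).toNat = 2 + j := by omega
      have e2 : (m - (c + 2)).toNat = 1 + j := by omega
      have e3 : (m - (c + 3)).toNat = j := by omega
      rw [e1, e2, e3, hj]
      have h4 : 0 < 4 ^ j := pow_pos (by norm_num) _
      have : 4 ^ (1 + j) = 4 * 4 ^ j := by ring
      have : 4 ^ (2 + j) = 16 * 4 ^ j := by ring
      have : 4 ^ (3 + j) = 64 * 4 ^ j := by ring
      omega


-- B's DP state after k iterations.
def pvTrip : Nat → Int × Int × Int
  | 0 => (0, 0, 1)
  | k + 1 => ((pvTrip k).2.1, (pvTrip k).2.2, (pvTrip k).1 + (pvTrip k).2.1 + (pvTrip k).2.2)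

-- number of 1/2/3-step paths across distance d (0 for negative d)
def pvWays (d : Int) : Int := if d < 0 then 0 else (pvTrip d.toNat).2.2

theorem pvTrip_spec (k : Nat) :
    pvTrip k = (pvWays ((k : Int) - 2), pvWays ((k : Int) - 1), pvWays (k : Int)) := by
  induction k with
  | zero => decide
  | succ k ih =>
    have h1 : ((k : Int) + 1) - 2 = (k : Int) - 1 := by ring
    have h2 : ((k : Int) + 1) - 1 = (k : Int) := by ring
    have h3 : pvWays ((k : Int) + 1) = (pvTrip (k + 1)).2.2 := by
      have ht : ((k : Int) + 1).toNat = k + 1 := by omega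
      unfold pvWays
      rw [if_neg (by omega), ht]
    show pvTrip (k + 1) = _
    push_cast
    rw [h1, h2, h3]
    simp only [pvTrip]
    rw [ih]

theorem pvWays_neg {d : Int} (h : d < 0) : pvWays d = 0 := by simp [pvWays, h]

theorem pvWays_rec {d : Int} (h : 1 ≤ d) :
    pvWays d = pvWays (d - 1) + pvWays (d - 2) + pvWays (d - 3) := by
  obtain ⟨k, hk⟩ : ∃ k : Nat, d = (k : Int) + 1 := ⟨(d - 1).toNat, by omega⟩
  subst hk
  have h3 : pvWays ((k : Int) + 1) = (pvTrip (k + 1)).2.2 := by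
    have ht : ((k : Int) + 1).toNat = k + 1 := by omega
    unfold pvWays
    rw [if_neg (by omega), ht]
  rw [h3]
  have := pvTrip_spec k
  simp only [pvTrip, this]
  have e1 : (k : Int) + 1 - 1 = (k : Int) := by ring
  have e2 : (k : Int) + 1 - 2 = (k : Int) - 1 := by ring
  have e3 : (k : Int) + 1 - 3 = (k : Int) - 2 := by ring
  rw [e1, e2, e3]; ring

def pvSum (m : Int) (s : List Int) : Int := (s.map (fun c => pvWays (m - c))).sum

theorem pvLoopA_eq (m : Int) : ∀ (fuel : Nat) (s : List Int) (p : Int),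
    pvStackW m s ≤ fuel → pvLoopA m fuel s p = p + pvSum m s := by
  intro fuel
  induction fuel with
  | zero =>
    intro s p h
    cases s with
    | nil => simp [pvLoopA, pvSum]
    | cons c rest =>
      exfalso
      have : 0 < 4 ^ (m - c).toNat := pow_pos (by norm_num) _
      simp only [pvStackW] at h
      omega
  | succ fuel ih =>
    intro s p h
    cases s with
    | nil => simp [pvLoopA, pvSum]
    | cons c rest =>
      by_cases hc : c = m
      · subst hc
        have hrest : pvStackW c rest ≤ fuel := by
          have : 0 < 4 ^ (c - c).toNat := pow_pos (by norm_num) _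
          simp only [pvStackW] at h
          omega
        have h1 : pvWays (c - c) = 1 := by
          unfold pvWays
          rw [if_neg (by omega)]
          simp [pvTrip]
        rw [pvLoopA, if_pos rfl, ih rest (p + 1) hrest]
        simp only [pvSum, List.map_cons, List.sum_cons, h1]
        ring
      · have hnew : pvStackW m ((PySem.List.pyRange 1 (min (m - c) 3 + 1) 1).foldl
            (fun st i => (c + i) :: st) rest) ≤ fuel := by
          have := pvStackW_push_lt m c rest
          omega
        rw [pvLoopA, if_neg hc, ih _ p hnew]
        congr 1
        -- pvSum of the pushed stack equals pvWays (m - c) + pvSum of (c :: rest)'s head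
        rcases lt_trichotomy (m - c) 1 with hd | hd | hd
        · have hd0 : m - c < 0 := by omega
          have h1 : min (m - c) 3 + 1 ≤ 1 := by omega
          rw [PySem.List.pyRange_one_eq_nil h1]
          simp [pvSum, pvWays_neg hd0]
        · have h1 : min (m - c) 3 + 1 = 2 := by omega
          rw [h1, show PySem.List.pyRange 1 2 1 = [1] from by decide]
          simp only [List.foldl_cons, List.foldl_nil, pvSum, List.map_cons, List.sum_cons]
          rw [pvWays_rec (by omega : (1:Int) ≤ m - c)]
          rw [pvWays_neg (by omega : m - c - 2 < 0), pvWays_neg (by omega : m - c - 3 < 0)]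
          have : m - (c + 1) = m - c - 1 := by ring
          rw [this]; ring
        · rcases lt_trichotomy (m - c) 3 with hd3 | hd3 | hd3
          · have h1 : min (m - c) 3 + 1 = 3 := by omega
            rw [h1, show PySem.List.pyRange 1 3 1 = [1, 2] from by decide]
            simp only [List.foldl_cons, List.foldl_nil, pvSum, List.map_cons, List.sum_cons]
            rw [pvWays_rec (by omega : (1:Int) ≤ m - c)]
            rw [pvWays_neg (by omega : m - c - 3 < 0)]
            have e1 : m - (c + 1) = m - c - 1 := by ring
            have e2 : m - (c + 2) = m - c - 2 := by ring
            rw [e1, e2]; ring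
          all_goals
          · have h1 : min (m - c) 3 + 1 = 4 := by omega
            rw [h1, show PySem.List.pyRange 1 4 1 = [1, 2, 3] from by decide]
            simp only [List.foldl_cons, List.foldl_nil, pvSum, List.map_cons, List.sum_cons]
            rw [pvWays_rec (by omega : (1:Int) ≤ m - c)]
            have e1 : m - (c + 1) = m - c - 1 := by ring
            have e2 : m - (c + 2) = m - c - 2 := by ring
            have e3 : m - (c + 3) = m - c - 3 := by ring
            rw [e1, e2, e3]; ring

theorem pvFoldl_trip (l : List Int) (j : Nat) :
    l.foldl (fun (s : Int × Int × Int) _ => (s.2.1, s.2.2, s.1 + s.2.1 + s.2.2)) (pvTrip j)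
      = pvTrip (j + l.length) := by
  induction l generalizing j with
  | nil => simp
  | cons x xs ih =>
    simp only [List.foldl_cons, List.length_cons]
    have : ((pvTrip j).2.1, (pvTrip j).2.2, (pvTrip j).1 + (pvTrip j).2.1 + (pvTrip j).2.2)
        = pvTrip (j + 1) := rfl
    rw [this, ih]
    congr 1; omega

-- ===== VERDICT (by name: the statement is the Claim_ definition above) =====
theorem process_sub_network_spec : Claim_equal_process_sub_network := by
  intro sub_net _
  show process_sub_network sub_net = process_sub_network_alt sub_net
  unfold process_sub_network process_sub_network_alt
  rw [pvLoopA_eq _ _ _ _ (le_refl _)]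
  simp only [pvSum, List.map_cons, List.map_nil, List.sum_cons, List.sum_nil]
  rcases Nat.eq_zero_or_pos sub_net.length with h0 | hpos
  · rw [h0]
    norm_num
    exact pvWays_neg (by norm_num)
  · have hne : ((sub_net.length : Int)) ≠ 0 := by omega
    simp only [if_neg hne]
    have hfold := pvFoldl_trip (PySem.List.pyRange 0 ((sub_net.length : Int) - 1) 1) 0
    simp only [pvTrip] at hfold
    rw [hfold, PySem.List.length_pyRange_one]
    have hlen : (((sub_net.length : Int) - 1 - 0).toNat) = sub_net.length - 1 := by omega
    rw [hlen]
    have : pvWays ((sub_net.length : Int) - 1 - 0)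
        = (pvTrip ((sub_net.length : Int) - 1 - 0).toNat).2.2 := by
      rw [pvWays, if_neg (by omega)]
    rw [this, hlen]
    ring_nf
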